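-- pv_equiv track=rewrite | github.com/LanLab/STECFinder | stecfinder/STECfinder.py | top_ranked_hantigen
-- ===== SOURCE A (Python) =====
-- def delete_genes(remove, genes):
--     for g in remove:
--         del genes[g]
--     return genes
--
-- def top_ranked_hantigen(genes_set):
--     tophit = ["",0]
--     for gene in genes_set:
--         if gene.startswith("fliC"):
--             genescore = genes_set[gene]['score']
--             if genescore > tophit[1]:
--                 tophit = [gene,genescore]
--     remove = []
--     for gene in genes_set:
--         if gene.startswith("fliC"):
--             if gene != tophit[0]:
--                 remove.append(gene)
--     genes = delete_genes(remove, genes_set)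
--     return genes
-- ===== SOURCE B (Python) =====
-- def top_ranked_hantigen(genes_set):
--     # Simpler decomposition: pick the best fliC hit with max(), then rebuild the
--     # dict in one comprehension. NOTE: returns a fresh dict; A mutates its argument.
--     flic = [(g, v['score']) for g, v in genes_set.items() if g.startswith("fliC")]
--     keep = ""
--     if flic:
--         best = max(flic, key=lambda p: p[1])
--         if best[1] > 0:
--             keep = best[0]
--     return {g: v for g, v in genes_set.items()
--             if not g.startswith("fliC") or g == keep}
-- ===== Notes on version B (the rewrite author's own statement) =====
-- stated objective: simpler
-- what changed: Replaces the manual running-max loop, the remove-list loop and the delete helper with one comprehension collecting (fliC gene, score) pairs, max() with a key to pick the first top scorer, and a single dict comprehension building the result; B returns a fresh dict instead of mutating the argument in place (return value is identical).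
import Mathlib
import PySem

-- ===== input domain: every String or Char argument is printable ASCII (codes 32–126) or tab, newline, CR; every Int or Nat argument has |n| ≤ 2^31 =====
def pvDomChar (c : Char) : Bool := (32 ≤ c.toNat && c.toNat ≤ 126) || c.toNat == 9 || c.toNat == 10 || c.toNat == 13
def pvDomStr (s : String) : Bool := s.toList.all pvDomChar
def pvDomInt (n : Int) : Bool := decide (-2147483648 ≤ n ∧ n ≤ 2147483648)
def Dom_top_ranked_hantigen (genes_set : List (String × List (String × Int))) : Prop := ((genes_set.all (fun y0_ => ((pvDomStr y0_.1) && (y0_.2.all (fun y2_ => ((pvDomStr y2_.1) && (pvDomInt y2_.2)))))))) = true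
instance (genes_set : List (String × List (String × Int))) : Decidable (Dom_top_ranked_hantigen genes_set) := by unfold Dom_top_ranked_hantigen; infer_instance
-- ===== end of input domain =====

-- B replaces A's manual running-max loop + remove-list + delete helper by max() over the
-- (fliC gene, score) pairs and one filtering comprehension (simpler decomposition, same cost);
-- equivalence is about the RETURN value only: A mutates its argument in place, B builds a fresh dict.


-- ===== PORT A =====
-- genes_set[gene]['score']: inner-dict lookup; total via getD 0 — Pre_ guarantees the key is
-- present wherever it is read (otherwise the Python raises KeyError).
def pvScoreA (v : List (String × Int)) : Int := ((PySem.Dict.ofList v).get? "score").getD 0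

def top_ranked_hantigen (genes_set : List (String × List (String × Int))) : List (String × List (String × Int)) :=
  -- tophit = ["",0]; for gene in genes_set: if startswith and score > tophit[1]: tophit = [gene, score]
  let tophit : String × Int := genes_set.foldl
    (fun th g =>
      if PySem.Str.startswith g.1 "fliC" then
        (if pvScoreA g.2 > th.2 then (g.1, pvScoreA g.2) else th)
      else th) ("", 0)
  -- remove = [gene for gene … if startswith and gene != tophit[0]]
  let remove : List String := genes_set.foldl
    (fun r g =>
      if PySem.Str.startswith g.1 "fliC" then
        (if g.1 ≠ tophit.1 then r ++ [g.1] else r)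
      else r) []
  -- delete_genes(remove, genes_set): for g in remove: del genes[g]
  remove.foldl (fun gs k => gs.filter (fun p => decide (p.1 ≠ k))) genes_set

-- ===== PORT B =====
def pvScoreB (v : List (String × Int)) : Int := ((PySem.Dict.ofList v).get? "score").getD 0

def top_ranked_hantigen_alt (genes_set : List (String × List (String × Int))) : List (String × List (String × Int)) :=
  -- flic = [(g, v['score']) for g, v in genes_set.items() if g.startswith("fliC")]
  let flic : List (String × Int) :=
    (genes_set.filter (fun p => PySem.Str.startswith p.1 "fliC")).map (fun p => (p.1, pvScoreB p.2))
  -- keep = best[0] if flic and max(flic, key=…)[1] > 0 else ""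
  let keep : String :=
    match PySem.List.max? flic (fun p => p.2) with
    | none => ""
    | some best => if best.2 > 0 then best.1 else ""
  -- {g: v for g, v in genes_set.items() if not g.startswith("fliC") or g == keep}
  genes_set.filter (fun p => !PySem.Str.startswith p.1 "fliC" || decide (p.1 = keep))

-- ===== PRECONDITION & SPEC =====
-- Pre_ excludes (a) association lists with duplicate gene names — a Python dict cannot represent
-- them, so nothing is claimed there — and (b) inputs where some fliC gene's inner dict lacks the
-- key "score", on which the Python A raises KeyError.
def Pre_top_ranked_hantigen (genes_set : List (String × List (String × Int))) : Prop :=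
  (genes_set.map Prod.fst).Nodup ∧
  ∀ p ∈ genes_set, PySem.Str.startswith p.1 "fliC" = true →
    (PySem.Dict.ofList p.2).contains "score" = true
instance (genes_set : List (String × List (String × Int))) : Decidable (Pre_top_ranked_hantigen genes_set) := by unfold Pre_top_ranked_hantigen; infer_instance

def pvWitness_top_ranked_hantigen : (List (String × List (String × Int))) :=
  [("fliC-H7", [("score", 5), ("length", 100)]), ("fliC-H2", [("score", 3)]), ("wzx", [("score", 9)])]

def Spec_top_ranked_hantigen (genes_set : List (String × List (String × Int))) (out : List (String × List (String × Int))) : Prop := out = top_ranked_hantigen_alt genes_set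
instance (genes_set : List (String × List (String × Int))) (out : List (String × List (String × Int))) : Decidable (Spec_top_ranked_hantigen genes_set out) := by unfold Spec_top_ranked_hantigen; infer_instance

-- ===== CLAIM (what is proved, stated in full; the proofs are below) =====
def Claim_equal_top_ranked_hantigen : Prop := ∀ (genes_set : List (String × List (String × Int))), Dom_top_ranked_hantigen genes_set → Pre_top_ranked_hantigen genes_set → Spec_top_ranked_hantigen genes_set (top_ranked_hantigen genes_set)

-- ===== LEMMAS AND PROOFS =====

-- A's running-max loop over a prepared list of (name, score) pairs.
def pvG (l : List (String × Int)) (th : String × Int) : String × Int :=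
  l.foldl (fun th g => if g.2 > th.2 then g else th) th

theorem pvG_nil (th : String × Int) : pvG [] th = th := rfl

theorem pvG_cons (x : String × Int) (t : List (String × Int)) (th : String × Int) :
    pvG (x :: t) th = pvG t (if x.2 > th.2 then x else th) := rfl

-- the tracked score never decreases
theorem pvG_mono (l : List (String × Int)) (th : String × Int) : th.2 ≤ (pvG l th).2 := by
  induction l generalizing th with
  | nil => simp [pvG_nil]
  | cons x t ih =>
    rw [pvG_cons]
    split_ifs with h
    · exact le_of_lt (lt_of_lt_of_le h (ih x))
    · exact ih th

-- if the final score did not rise above the start, the accumulator never moved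
theorem pvG_fix (l : List (String × Int)) (th : String × Int)
    (h : (pvG l th).2 ≤ th.2) : pvG l th = th := by
  induction l generalizing th with
  | nil => rfl
  | cons x t ih =>
    rw [pvG_cons] at h ⊢
    split_ifs at h ⊢ with hx
    · exact absurd (le_trans (pvG_mono t x) h) (not_le_of_gt hx)
    · exact ih th h

-- with two non-positive starts, a positive final maximum does not depend on the start
theorem pvG_pos_eq (l : List (String × Int)) (th th' : String × Int)
    (h : th.2 ≤ 0) (h' : th'.2 ≤ 0) (hp : 0 < (pvG l th).2) : pvG l th = pvG l th' := by
  induction l generalizing th th' with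
  | nil => exact absurd hp (not_lt_of_ge (by simpa [pvG_nil] using h))
  | cons x t ih =>
    rw [pvG_cons] at hp ⊢
    rw [pvG_cons]
    by_cases hx : 0 < x.2
    · have e1 : (if x.2 > th.2 then x else th) = x := by
        rw [if_pos (lt_of_le_of_lt h hx)]
      have e2 : (if x.2 > th'.2 then x else th) = x := by
        rw [if_pos (lt_of_le_of_lt h' hx)]
      rw [e1] at hp ⊢
      split_ifs with h2
      · rfl
      · exact absurd (lt_of_le_of_lt h' hx) h2
    · replace hx : x.2 ≤ 0 := Int.not_lt.mp hx
      have ha : (if x.2 > th.2 then x else th).2 ≤ 0 := by split_ifs <;> assumption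
      have ha' : (if x.2 > th'.2 then x else th').2 ≤ 0 := by split_ifs <;> assumption
      exact ih _ _ ha ha' hp

-- B's max() over the pair list is A's running-max loop
theorem pvMax (t : List (String × Int)) (x : String × Int) :
    PySem.List.max? (x :: t) (fun p : String × Int => p.2) = some (pvG t x) := by
  induction t generalizing x with
  | nil => rfl
  | cons y t ih =>
    rw [pvG_cons]
    by_cases h : y.2 > x.2
    · have e : PySem.List.max? (x :: y :: t) (fun p : String × Int => p.2)
          = PySem.List.max? (y :: t) (fun p : String × Int => p.2) := by
        unfold PySem.List.max?
        simp only [List.foldl_cons]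
        congr 1
        show (if x.2 < y.2 then some y else some x) = some y
        rw [if_pos h]
      rw [e, ih, if_pos h]
    · have e : PySem.List.max? (x :: y :: t) (fun p : String × Int => p.2)
          = PySem.List.max? (x :: t) (fun p : String × Int => p.2) := by
        unfold PySem.List.max?
        simp only [List.foldl_cons]
        congr 1
        show (if x.2 < y.2 then some y else some x) = some x
        rw [if_neg h]
      rw [e, ih, if_neg h]

-- the kept gene: B's max?-then-threshold equals the first component of A's loop result
theorem pvKeep_eq (l : List (String × Int)) :
    (match PySem.List.max? l (fun p => p.2) with
     | none => ""
     | some best => if best.2 > 0 then best.1 else "")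
    = (pvG l ("", 0)).1 := by
  cases l with
  | nil => rfl
  | cons x t =>
    have hmax : PySem.List.max? (x :: t) (fun p : String × Int => p.2) = some (pvG t x) := pvMax t x
    rw [hmax]
    show (if (pvG t x).2 > 0 then (pvG t x).1 else "") = (pvG (x :: t) ("", 0)).1
    rw [pvG_cons]
    by_cases hx : 0 < x.2
    · have e1 : (if x.2 > ((("" : String), (0 : Int))).2 then x else ("", 0)) = x := if_pos hx
      rw [e1, if_pos (lt_of_lt_of_le hx (pvG_mono t x))]
    · have hx' : x.2 ≤ 0 := Int.not_lt.mp hx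
      have e1 : (if x.2 > ((("" : String), (0 : Int))).2 then x else ("", 0)) = ("", 0) := if_neg hx
      rw [e1]
      by_cases hp : 0 < (pvG t x).2
      · rw [if_pos hp, pvG_pos_eq t x ("", 0) hx' (le_refl 0) hp]
      · have hp' : (pvG t x).2 ≤ 0 := Int.not_lt.mp hp
        rw [if_neg hp]
        have h0 : (pvG t ("", 0)).2 ≤ 0 := by
          by_contra hc
          have hc' : 0 < (pvG t ("", 0)).2 := lt_of_not_ge (fun hge => hc (by simpa using hge))
          have := pvG_pos_eq t ("", 0) x (le_refl 0) hx' hc'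
          rw [this] at hc'
          exact absurd hc' hp
        rw [pvG_fix t ("", 0) h0]

-- A's remove-building loop is a filter-then-map
theorem pvRemove_eq (gs : List (String × List (String × Int))) (k : String) (r : List String) :
    gs.foldl
      (fun r g =>
        if PySem.Str.startswith g.1 "fliC" then
          (if g.1 ≠ k then r ++ [g.1] else r)
        else r) r
    = r ++ (gs.filter (fun g => PySem.Str.startswith g.1 "fliC" && decide (g.1 ≠ k))).map Prod.fst := by
  induction gs generalizing r with
  | nil => simp
  | cons g t ih =>
    rw [List.foldl_cons, List.filter_cons]
    by_cases h1 : PySem.Str.startswith g.1 "fliC" = true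
    · by_cases h2 : g.1 ≠ k
      · rw [if_pos h1, if_pos h2,
          if_pos (show (PySem.Str.startswith g.1 "fliC" && decide (g.1 ≠ k)) = true by
            simp only [h1, Bool.true_and, decide_eq_true_iff]; exact h2),
          ih, List.map_cons]
        simp
      · rw [if_pos h1, if_neg h2,
          if_neg (show ¬ (PySem.Str.startswith g.1 "fliC" && decide (g.1 ≠ k)) = true by
            simp only [Bool.and_eq_true, decide_eq_true_iff, not_and]; exact fun _ => h2),
          ih]
    · rw [if_neg h1,
        if_neg (show ¬ (PySem.Str.startswith g.1 "fliC" && decide (g.1 ≠ k)) = true by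
          simp only [Bool.and_eq_true, not_and]
          exact fun h _ => h1 h),
        ih]

-- A's delete loop is one filter
theorem pvDelete_eq (rs : List String) (gs : List (String × List (String × Int))) :
    rs.foldl (fun gs k => gs.filter (fun p => decide (p.1 ≠ k))) gs
    = gs.filter (fun p => decide (p.1 ∉ rs)) := by
  induction rs generalizing gs with
  | nil => simp
  | cons r t ih =>
    simp only [List.foldl_cons, ih, List.filter_filter]
    apply List.filter_congr
    intro p _
    simp [List.mem_cons, not_or, Bool.and_comm]

-- ===== VERDICT (by name: the statement is the Claim_ definition above) =====
theorem top_ranked_hantigen_spec : Claim_equal_top_ranked_hantigen := by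
  intro gs _ _
  unfold Spec_top_ranked_hantigen top_ranked_hantigen top_ranked_hantigen_alt
  simp only []
  -- identify the two "kept gene" computations
  have hscore : pvScoreB = pvScoreA := rfl
  set flic : List (String × Int) :=
    (gs.filter (fun p => PySem.Str.startswith p.1 "fliC")).map (fun p => (p.1, pvScoreB p.2)) with hflic
  have htop :
      gs.foldl
        (fun th g =>
          if PySem.Str.startswith g.1 "fliC" then
            (if pvScoreA g.2 > th.2 then (g.1, pvScoreA g.2) else th)
          else th) ("", 0)
      = pvG flic ("", 0) := by
    rw [hflic, hscore]
    unfold pvG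
    rw [List.foldl_map, List.foldl_filter]
  set keep : String :=
    (match PySem.List.max? flic (fun p => p.2) with
     | none => ""
     | some best => if best.2 > 0 then best.1 else "") with hkeep
  have hk : keep = (pvG flic ("", 0)).1 := by rw [hkeep, pvKeep_eq]
  rw [htop, ← hk, pvRemove_eq, List.nil_append, pvDelete_eq]
  apply List.filter_congr
  intro p hp
  have hmem : p.1 ∈ (gs.filter (fun g => PySem.Str.startswith g.1 "fliC" && decide (g.1 ≠ keep))).map Prod.fst
      ↔ (PySem.Str.startswith p.1 "fliC" = true ∧ p.1 ≠ keep) := by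
    constructor
    · intro h
      obtain ⟨q, hq, hqe⟩ := List.mem_map.mp h
      obtain ⟨_, hqp⟩ := List.mem_filter.mp hq
      rw [Bool.and_eq_true, decide_eq_true_iff] at hqp
      exact ⟨hqe ▸ hqp.1, hqe ▸ hqp.2⟩
    · rintro ⟨h1, h2⟩
      exact List.mem_map.mpr ⟨p, List.mem_filter.mpr ⟨hp, by simp only [h1, Bool.true_and, decide_eq_true_iff]; exact h2⟩, rfl⟩
  by_cases hsw : PySem.Str.startswith p.1 "fliC" = true
  · by_cases he : p.1 = keep
    · have hnm : p.1 ∉ (gs.filter (fun g => PySem.Str.startswith g.1 "fliC" && decide (g.1 ≠ keep))).map Prod.fst :=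
        fun h => ((hmem.mp h).2) he
      rw [decide_eq_true hnm, hsw, decide_eq_true he]; rfl
    · have hm : p.1 ∈ (gs.filter (fun g => PySem.Str.startswith g.1 "fliC" && decide (g.1 ≠ keep))).map Prod.fst :=
        hmem.mpr ⟨hsw, he⟩
      rw [decide_eq_false (not_not_intro hm), hsw, decide_eq_false he]; rfl
  · have hsw' : PySem.Str.startswith p.1 "fliC" = false := by
      cases hb : PySem.Str.startswith p.1 "fliC" with
      | false => rfl
      | true => exact absurd hb hsw
    have hnm : p.1 ∉ (gs.filter (fun g => PySem.Str.startswith g.1 "fliC" && decide (g.1 ≠ keep))).map Prod.fst :=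
      fun h => absurd (hmem.mp h).1 hsw
    rw [decide_eq_true hnm, hsw', Bool.not_false, Bool.true_or]
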